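-- pv_equiv track=rewrite | github.com/Atundebarnabas/Constra_2025 | take_trade_bot/main.py | issueNumberOfTrade
-- ===== SOURCE A (Python) =====
-- def issueNumberOfTrade(acc_bal):
--     thresholds = [
--         (10000, 20),
--         (5000, 17),
--         (1000, 15),
--         (500, 12),
--         (150, 10),
--         (0, 8)
--     ]
--
--     for limit, trades in thresholds:
--         if acc_bal >= limit:
--             return trades
-- ===== SOURCE B (Python) =====
-- def issueNumberOfTrade(acc_bal):
--     bounds = [0, 150, 500, 1000, 5000, 10000]
--     counts = [8, 10, 12, 15, 17, 20]
--     lo, hi = 0, len(bounds)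
--     while lo < hi:
--         mid = (lo + hi) // 2
--         if bounds[mid] <= acc_bal:
--             lo = mid + 1
--         else:
--             hi = mid
--     return counts[lo - 1]
-- ===== Notes on version B (the rewrite author's own statement) =====
-- stated objective: alternative
-- what changed: Replaced the descending linear scan over (limit, trades) pairs with a binary search (hand-rolled bisect_right) over an ascending boundary array and a parallel trade-count array.
-- outside the precondition, e.g. on issueNumberOfTrade(-3): A returns None, B returns 20
import Mathlib
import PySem

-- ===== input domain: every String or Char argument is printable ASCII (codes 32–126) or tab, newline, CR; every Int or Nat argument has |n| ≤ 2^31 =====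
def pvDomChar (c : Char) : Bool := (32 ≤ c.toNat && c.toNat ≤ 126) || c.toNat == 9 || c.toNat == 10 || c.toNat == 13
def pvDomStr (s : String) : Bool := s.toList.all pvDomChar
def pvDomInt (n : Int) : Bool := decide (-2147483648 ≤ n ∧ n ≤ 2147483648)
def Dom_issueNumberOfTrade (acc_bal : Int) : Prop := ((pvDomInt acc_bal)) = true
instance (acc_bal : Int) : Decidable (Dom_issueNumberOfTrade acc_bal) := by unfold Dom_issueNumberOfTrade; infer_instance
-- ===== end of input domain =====

-- B replaces A's descending linear threshold scan with a binary search over ascending boundaries (alternative decomposition of the same mapping).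


-- ===== PORT A =====
-- A's for-loop with early return; the fall-through (acc_bal < 0) returns Python None, which is outside Pre_; 0 is a placeholder there.
def pvScanA (acc_bal : Int) : List (Int × Int) → Int
  | [] => 0
  | (limit, trades) :: rest => if acc_bal ≥ limit then trades else pvScanA acc_bal rest

def issueNumberOfTrade (acc_bal : Int) : Int :=
  pvScanA acc_bal [(10000, 20), (5000, 17), (1000, 15), (500, 12), (150, 10), (0, 8)]

-- ===== PORT B =====
def pvBounds : List Int := [0, 150, 500, 1000, 5000, 10000]
def pvCounts : List Int := [8, 10, 12, 15, 17, 20]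

-- the while loop of Source B (hand-rolled bisect_right), on Int indices as in Python
def pvBisect (acc_bal : Int) (lo hi : Int) : Int :=
  if lo < hi then
    let mid := PySem.Int.floordiv (lo + hi) 2
    if PySem.List.pyGetD pvBounds mid 0 ≤ acc_bal then pvBisect acc_bal (mid + 1) hi
    else pvBisect acc_bal lo mid
  else lo
termination_by (hi - lo).toNat
decreasing_by
  all_goals
    simp only [PySem.Int.floordiv] at *
    rw [Int.fdiv_eq_ediv_of_nonneg _ (by norm_num : (0:Int) ≤ 2)] at *
    omega

def issueNumberOfTrade_alt (acc_bal : Int) : Int :=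
  PySem.List.pyGetD pvCounts (pvBisect acc_bal 0 6 - 1) 0

-- ===== PRECONDITION & SPEC =====
-- Pre_ excludes acc_bal < 0, where A's loop falls through and returns None, not an int.
def Pre_issueNumberOfTrade (acc_bal : Int) : Prop := 0 ≤ acc_bal
instance (acc_bal : Int) : Decidable (Pre_issueNumberOfTrade acc_bal) := by unfold Pre_issueNumberOfTrade; infer_instance
def pvWitness_issueNumberOfTrade : Int := 150

def Spec_issueNumberOfTrade (acc_bal : Int) (out : Int) : Prop := out = issueNumberOfTrade_alt acc_bal
instance (acc_bal : Int) (out : Int) : Decidable (Spec_issueNumberOfTrade acc_bal out) := by unfold Spec_issueNumberOfTrade; infer_instance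

-- ===== CLAIM (what is proved, stated in full; the proofs are below) =====
def Claim_equal_issueNumberOfTrade : Prop := ∀ (acc_bal : Int), Dom_issueNumberOfTrade acc_bal → Pre_issueNumberOfTrade acc_bal → Spec_issueNumberOfTrade acc_bal (issueNumberOfTrade acc_bal)

-- ===== LEMMAS AND PROOFS =====
theorem pvBisect_step (acc_bal lo hi mid b : Int) (hlt : lo < hi)
    (hmid : PySem.Int.floordiv (lo + hi) 2 = mid)
    (hb : PySem.List.pyGetD pvBounds mid 0 = b) :
    pvBisect acc_bal lo hi =
      if b ≤ acc_bal then pvBisect acc_bal (mid + 1) hi else pvBisect acc_bal lo mid := by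
  rw [pvBisect]
  simp only [hlt, if_pos, hmid, hb]

theorem pvBisect_stop (acc_bal : Int) {lo hi : Int} (h : ¬ lo < hi) :
    pvBisect acc_bal lo hi = lo := by
  rw [pvBisect]
  simp [h]

-- ===== VERDICT (by name: the statement is the Claim_ definition above) =====
theorem issueNumberOfTrade_spec : Claim_equal_issueNumberOfTrade := by
  intro acc_bal _ hpre
  unfold Pre_issueNumberOfTrade at hpre
  unfold Spec_issueNumberOfTrade issueNumberOfTrade issueNumberOfTrade_alt
  rcases lt_or_ge acc_bal 150 with h150 | h150
  · have hb : pvBisect acc_bal 0 6 = 1 := by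
      rw [pvBisect_step acc_bal 0 6 3 1000 (by norm_num) (by decide) (by decide), if_neg (by omega)]
      rw [pvBisect_step acc_bal 0 3 1 150 (by norm_num) (by decide) (by decide), if_neg (by omega)]
      rw [pvBisect_step acc_bal 0 1 0 0 (by norm_num) (by decide) (by decide), if_pos (by omega)]
      norm_num
      rw [pvBisect_stop acc_bal (by norm_num)]
    rw [hb, show PySem.List.pyGetD pvCounts (1 - 1) 0 = 8 from by decide]
    simp only [pvScanA]
    split_ifs <;> omega
  · rcases lt_or_ge acc_bal 500 with h500 | h500
    · have hb : pvBisect acc_bal 0 6 = 2 := by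
        rw [pvBisect_step acc_bal 0 6 3 1000 (by norm_num) (by decide) (by decide), if_neg (by omega)]
        rw [pvBisect_step acc_bal 0 3 1 150 (by norm_num) (by decide) (by decide), if_pos (by omega)]
        norm_num
        rw [pvBisect_step acc_bal 2 3 2 500 (by norm_num) (by decide) (by decide), if_neg (by omega)]
        rw [pvBisect_stop acc_bal (by norm_num)]
      rw [hb, show PySem.List.pyGetD pvCounts (2 - 1) 0 = 10 from by decide]
      simp only [pvScanA]
      split_ifs <;> omega
    · rcases lt_or_ge acc_bal 1000 with h1000 | h1000
      · have hb : pvBisect acc_bal 0 6 = 3 := by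
          rw [pvBisect_step acc_bal 0 6 3 1000 (by norm_num) (by decide) (by decide), if_neg (by omega)]
          rw [pvBisect_step acc_bal 0 3 1 150 (by norm_num) (by decide) (by decide), if_pos (by omega)]
          norm_num
          rw [pvBisect_step acc_bal 2 3 2 500 (by norm_num) (by decide) (by decide), if_pos (by omega)]
          norm_num
          rw [pvBisect_stop acc_bal (by norm_num)]
        rw [hb, show PySem.List.pyGetD pvCounts (3 - 1) 0 = 12 from by decide]
        simp only [pvScanA]
        split_ifs <;> omega
      · rcases lt_or_ge acc_bal 5000 with h5000 | h5000
        · have hb : pvBisect acc_bal 0 6 = 4 := by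
            rw [pvBisect_step acc_bal 0 6 3 1000 (by norm_num) (by decide) (by decide), if_pos (by omega)]
            norm_num
            rw [pvBisect_step acc_bal 4 6 5 10000 (by norm_num) (by decide) (by decide), if_neg (by omega)]
            rw [pvBisect_step acc_bal 4 5 4 5000 (by norm_num) (by decide) (by decide), if_neg (by omega)]
            rw [pvBisect_stop acc_bal (by norm_num)]
          rw [hb, show PySem.List.pyGetD pvCounts (4 - 1) 0 = 15 from by decide]
          simp only [pvScanA]
          split_ifs <;> omega
        · rcases lt_or_ge acc_bal 10000 with h10000 | h10000
          · have hb : pvBisect acc_bal 0 6 = 5 := by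
              rw [pvBisect_step acc_bal 0 6 3 1000 (by norm_num) (by decide) (by decide), if_pos (by omega)]
              norm_num
              rw [pvBisect_step acc_bal 4 6 5 10000 (by norm_num) (by decide) (by decide), if_neg (by omega)]
              rw [pvBisect_step acc_bal 4 5 4 5000 (by norm_num) (by decide) (by decide), if_pos (by omega)]
              norm_num
              rw [pvBisect_stop acc_bal (by norm_num)]
            rw [hb, show PySem.List.pyGetD pvCounts (5 - 1) 0 = 17 from by decide]
            simp only [pvScanA]
            split_ifs <;> omega
          · have hb : pvBisect acc_bal 0 6 = 6 := by
              rw [pvBisect_step acc_bal 0 6 3 1000 (by norm_num) (by decide) (by decide), if_pos (by omega)]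
              norm_num
              rw [pvBisect_step acc_bal 4 6 5 10000 (by norm_num) (by decide) (by decide), if_pos (by omega)]
              norm_num
              rw [pvBisect_stop acc_bal (by norm_num)]
            rw [hb, show PySem.List.pyGetD pvCounts (6 - 1) 0 = 20 from by decide]
            simp only [pvScanA]
            split_ifs <;> omega
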